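-- pv_equiv track=rewrite | github.com/Julesd5/sl29.games.2048 | src/sl29/games/_2048.py | _deplacer_droite
-- ===== SOURCE A (Python) =====
-- from typing import List, Tuple
--
-- TAILLE:int = 4
--
-- def _supprimer_zeros(ligne: List[int]) -> List[int]:
--     """
--     Supprime les zéros d'une ligne.
--
--     :param ligne: Une ligne de la grille.
--     :type ligne: List[int]
--     :return: La ligne sans zéros.
--     :rtype: List[int]
--     """
--     result = []
--     for value in ligne:
--         if value != 0:
--             result.append(value)
--     return result
--
-- def _fusionner(ligne: List[int]) -> Tuple[List[int], int]:
--     """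
--     Fusionne les valeurs identiques consécutives d'une ligne.
--
--     :param ligne: Une ligne sans zéros.
--     :type ligne: List[int]
--     :return: La ligne après fusion, les points gagnés
--     :rtype: Tuple[List[int], int]
--     """
--     liste_fusionnee = []
--     i = 0
--     points = 0
--
--     while i < len(ligne):
--         if (i+1)< len(ligne) and ligne[i]==ligne[i+1]:
--             fusion = ligne[i] + ligne[i+1]
--             points += fusion
--             liste_fusionnee.append(fusion)
--             i += 2
--         else:
--             liste_fusionnee.append(ligne[i])
--             i += 1
--     return liste_fusionnee, points
--
-- def _completer_zeros(ligne: List[int]) -> List[int]: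
--     """
--     :param ligne: Une ligne sans zeros
--     :type ligne: List[int]
--     :return: La ligne avec des zeros apres fusion
--     :rtype: Tuple[List[int], int]
--     """
--     liste = ligne
--     while len(liste) < TAILLE:
--         liste.append(0)
--     return liste
--
-- def _deplacer_droite(plateau: List[List[int]]) -> Tuple[List[List[int]], int]:
--     """
--     Déplace les tuiles vers la droite en fusionnant les valeurs identiques.
--
--     :param plateau: La grille actuelle du jeu.
--     :type plateau: List[List[int]]
--     :return: Un tuple contenant la nouvelle grille après déplacement et les points gagnés.
--     :rtype: Tuple[List[List[int]], int]
--     """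
--     nv_plateau = []
--     nv_points = 0
--     for i in range(len(plateau)):
--         ligne_inversee = plateau[i][::-1]
--         ligne_sans_zeros = _supprimer_zeros(ligne_inversee)
--         ligne_fusionee, points = _fusionner(ligne_sans_zeros)
--         nv_points += points
--         ligne_finale = _completer_zeros(ligne_fusionee)
--         ligne_finale = ligne_finale[::-1]
--         nv_plateau.append(ligne_finale)
--     return nv_plateau, nv_points
-- ===== SOURCE B (Python) =====
-- from typing import List, Tuple
--
-- TAILLE: int = 4
--
-- def _deplacer_droite(plateau: List[List[int]]) -> Tuple[List[List[int]], int]: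
--     """Single right-to-left pass per row with a merge flag; builds each new row directly."""
--     nv_plateau = []
--     total = 0
--     for ligne in plateau:
--         out = []            # new row, left-to-right (out[0] = most recently placed tile)
--         merged = False      # True if out[0] was produced by a merge
--         pts = 0
--         for v in reversed(ligne):
--             if v == 0:
--                 continue
--             if out and not merged and out[0] == v:
--                 out[0] = v + v
--                 pts += out[0]
--                 merged = True
--             else:
--                 out.insert(0, v)
--                 merged = False
--         nv_plateau.append([0] * (TAILLE - len(out)) + out)
--         total += pts
--     return nv_plateau, total
-- ===== Notes on version B (the rewrite author's own statement) =====
-- stated objective: simpler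
-- what changed: Replaces A's four-phase pipeline per row (reverse, strip zeros, pairwise-merge loop, pad, reverse again) by one right-to-left pass that builds the new row directly, maintaining a merge flag so a freshly merged tile cannot merge again.
import Mathlib
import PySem

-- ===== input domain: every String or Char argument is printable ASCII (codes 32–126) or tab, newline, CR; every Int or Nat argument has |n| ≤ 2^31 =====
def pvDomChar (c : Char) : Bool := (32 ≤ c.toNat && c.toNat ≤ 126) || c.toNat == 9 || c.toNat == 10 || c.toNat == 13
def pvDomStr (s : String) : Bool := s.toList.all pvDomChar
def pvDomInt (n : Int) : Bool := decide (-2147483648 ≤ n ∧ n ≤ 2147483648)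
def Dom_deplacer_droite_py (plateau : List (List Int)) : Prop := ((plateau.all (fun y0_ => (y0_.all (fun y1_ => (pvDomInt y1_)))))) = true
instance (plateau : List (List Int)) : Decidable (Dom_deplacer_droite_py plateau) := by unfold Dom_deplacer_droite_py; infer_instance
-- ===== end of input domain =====

-- B replaces A's four-phase per-row pipeline (reverse / strip zeros / pairwise merge loop / pad / reverse)
-- by one right-to-left pass per row with a merge flag, building the new row directly (objective: simpler).

-- ===== PORT A =====

-- _supprimer_zeros: append-if loop
def supprimerZeros (ligne : List Int) : List Int :=
  ligne.foldl (fun result value => if value ≠ 0 then result ++ [value] else result) []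

-- _fusionner: the while loop over index i (advancing by 1 or 2) as structural recursion on the rest of the list
def fusionner : List Int → List Int × Int
  | [] => ([], 0)
  | [x] => ([x], 0)
  | x :: y :: rest =>
    if x = y then
      let r := fusionner rest
      ((x + y) :: r.1, r.2 + (x + y))
    else
      let r := fusionner (y :: rest)
      (x :: r.1, r.2)

-- _completer_zeros: while len < 4 append 0
def completerZeros (liste : List Int) : List Int :=
  if liste.length < 4 then completerZeros (liste ++ [0]) else liste
termination_by 4 - liste.length
decreasing_by simp [List.length_append]; omega

def deplacer_droite_py (plateau : List (List Int)) : List (List Int) × Int :=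
  plateau.foldl (fun acc ligne =>
    let ligne_inversee := (PySem.List.slice? ligne none none (-1)).getD []   -- ligne[::-1]
    let ligne_sans_zeros := supprimerZeros ligne_inversee
    let r := fusionner ligne_sans_zeros
    let ligne_finale := (PySem.List.slice? (completerZeros r.1) none none (-1)).getD []
    (acc.1 ++ [ligne_finale], acc.2 + r.2)) ([], 0)

-- ===== PORT B =====

-- one step of B's inner loop: state (out, merged, pts), out kept left-to-right with out[0] the last placed tile
def altStep (s : List Int × Bool × Int) (v : Int) : List Int × Bool × Int :=
  if v = 0 then s
  else
    match s with
    | (x :: rest, false, pts) =>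
      if x = v then ((v + v) :: rest, true, pts + (v + v))
      else (v :: x :: rest, false, pts)
    | (out, _, pts) => (v :: out, false, pts)

def deplacer_droite_py_alt (plateau : List (List Int)) : List (List Int) × Int :=
  plateau.foldl (fun acc ligne =>
    let s := ligne.reverse.foldl altStep ([], false, 0)
    (acc.1 ++ [List.replicate (4 - s.1.length) 0 ++ s.1], acc.2 + s.2.2)) ([], 0)

-- ===== PRECONDITION & SPEC =====
def Spec_deplacer_droite_py (plateau : List (List Int)) (out : List (List Int) × Int) : Prop := out = deplacer_droite_py_alt plateau
instance (plateau : List (List Int)) (out : List (List Int) × Int) : Decidable (Spec_deplacer_droite_py plateau out) := by unfold Spec_deplacer_droite_py; infer_instance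

-- ===== CLAIM (what is proved, stated in full; the proofs are below) =====
def Claim_equal_deplacer_droite_py : Prop := ∀ (plateau : List (List Int)), Dom_deplacer_droite_py plateau → Spec_deplacer_droite_py plateau (deplacer_droite_py plateau)

-- ===== LEMMAS AND PROOFS =====

theorem supprimerZeros_eq_filter (l : List Int) : supprimerZeros l = l.filter (fun v => v ≠ 0) := by
  suffices h : ∀ acc, l.foldl (fun result value => if value ≠ 0 then result ++ [value] else result) acc
      = acc ++ l.filter (fun v => v ≠ 0) by
    simpa [supprimerZeros] using h []
  induction l with
  | nil => simp
  | cons x xs ih =>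
    intro acc
    simp only [List.foldl_cons, List.filter_cons]
    by_cases hx : x = 0
    · rw [if_neg (by simp [hx]), ih]
      simp [hx]
    · rw [if_pos hx, ih (acc ++ [x])]
      simp [hx]

-- B's fold skips zeros, so it only sees the nonzero elements
theorem bfold_filter (l : List Int) (s : List Int × Bool × Int) :
    l.foldl altStep s = (l.filter (fun v => v ≠ 0)).foldl altStep s := by
  induction l generalizing s with
  | nil => rfl
  | cons x xs ih =>
    by_cases hx : x = 0
    · simp [hx, altStep, ih]
    · simp [hx, ih]

-- core invariant: B's flagged fold computes fusionner's result (reversed), for zero-free lists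
theorem bfold_fusionner (l : List Int) (hl : ∀ v ∈ l, v ≠ 0) :
    (∀ o p, (l.foldl altStep (o, true, p)).1 = (fusionner l).1.reverse ++ o ∧
            (l.foldl altStep (o, true, p)).2.2 = p + (fusionner l).2) ∧
    (∀ x o p, (l.foldl altStep (x :: o, false, p)).1 = (fusionner (x :: l)).1.reverse ++ o ∧
              (l.foldl altStep (x :: o, false, p)).2.2 = p + (fusionner (x :: l)).2) := by
  induction l with
  | nil =>
    refine ⟨fun o p => by simp [fusionner], fun x o p => by simp [fusionner]⟩
  | cons y rest ih =>
    have hy : y ≠ 0 := hl y (by simp)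
    have hrest : ∀ v ∈ rest, v ≠ 0 := fun v hv => hl v (by simp [hv])
    have ih' := ih hrest
    constructor
    · intro o p
      -- merged = true: y cannot merge, it is consed and the flag clears
      have step : List.foldl altStep (o, true, p) (y :: rest)
          = List.foldl altStep (y :: o, false, p) rest := by
        cases o with
        | nil => simp [altStep, hy]
        | cons a as => simp [altStep, hy]
      rw [step]
      exact ih'.2 y o p
    · intro x o p
      by_cases hxy : x = y
      · -- merge: out[0] doubles, flag set
        have step : List.foldl altStep (x :: o, false, p) (y :: rest)
            = List.foldl altStep ((y + y) :: o, true, p + (y + y)) rest := by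
          simp [altStep, hy, hxy]
        rw [step]
        obtain ⟨h1, h2⟩ := ih'.1 ((y + y) :: o) (p + (y + y))
        subst hxy
        constructor
        · simp [fusionner, h1]
        · simp [fusionner, h2]; ring
      · have step : List.foldl altStep (x :: o, false, p) (y :: rest)
            = List.foldl altStep (y :: x :: o, false, p) rest := by
          simp [altStep, hy, hxy]
        rw [step]
        obtain ⟨h1, h2⟩ := ih'.2 y (x :: o) p
        constructor
        · simp [fusionner, hxy, h1]
        · simp [fusionner, hxy, h2]

theorem bfold_start (l : List Int) (hl : ∀ v ∈ l, v ≠ 0) :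
    (l.foldl altStep ([], false, 0)).1 = (fusionner l).1.reverse ∧
    (l.foldl altStep ([], false, 0)).2.2 = (fusionner l).2 := by
  cases l with
  | nil => simp [fusionner]
  | cons y rest =>
    have hy : y ≠ 0 := hl y (by simp)
    have hrest : ∀ v ∈ rest, v ≠ 0 := fun v hv => hl v (by simp [hv])
    have step : List.foldl altStep (([] : List Int), false, (0 : Int)) (y :: rest)
        = List.foldl altStep ([y], false, 0) rest := by simp [altStep, hy]
    rw [step]
    obtain ⟨h1, h2⟩ := (bfold_fusionner rest hrest).2 y [] 0
    exact ⟨by simpa using h1, by simpa using h2⟩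

theorem completerZeros_eq (l : List Int) : completerZeros l = l ++ List.replicate (4 - l.length) 0 := by
  suffices h : ∀ k (l : List Int), 4 - l.length = k → completerZeros l = l ++ List.replicate k 0 by
    exact h _ l rfl
  intro k
  induction k with
  | zero =>
    intro l h
    rw [completerZeros]
    have : ¬ l.length < 4 := by omega
    simp [this]
  | succ n ih =>
    intro l h
    rw [completerZeros]
    have hlt : l.length < 4 := by omega
    have := ih (l ++ [0]) (by simp; omega)
    simp [hlt, this, List.replicate_succ]

-- per-row equality of the two pipelines
theorem row_eq (ligne : List Int) :
    (((PySem.List.slice? (completerZeros (fusionner (supprimerZeros ((PySem.List.slice? ligne none none (-1)).getD []))).1) none none (-1)).getD []),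
      (fusionner (supprimerZeros ((PySem.List.slice? ligne none none (-1)).getD []))).2)
    = (List.replicate (4 - (ligne.reverse.foldl altStep ([], false, 0)).1.length) 0
        ++ (ligne.reverse.foldl altStep ([], false, 0)).1,
       (ligne.reverse.foldl altStep ([], false, 0)).2.2) := by
  rw [PySem.List.slice?_none_none_neg_one]
  simp only [Option.getD_some]
  have hfil : supprimerZeros ligne.reverse = ligne.reverse.filter (fun v => v ≠ 0) :=
    supprimerZeros_eq_filter _
  have hnz : ∀ v ∈ supprimerZeros ligne.reverse, v ≠ 0 := by
    rw [hfil]; intro v hv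
    have := List.of_mem_filter hv; simpa using this
  have hb := bfold_start (supprimerZeros ligne.reverse) hnz
  have hbf : ligne.reverse.foldl altStep ([], false, 0)
      = (supprimerZeros ligne.reverse).foldl altStep ([], false, 0) := by
    rw [hfil]; exact bfold_filter _ _
  rw [PySem.List.slice?_none_none_neg_one]
  simp only [Option.getD_some]
  rw [completerZeros_eq, Prod.ext_iff]
  refine ⟨?_, ?_⟩
  · rw [hbf, hb.1]
    simp [List.reverse_append]
  · rw [hbf, hb.2]

-- ===== VERDICT (by name: the statement is the Claim_ definition above) =====
theorem deplacer_droite_py_spec : Claim_equal_deplacer_droite_py := by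
  intro plateau _
  unfold Spec_deplacer_droite_py deplacer_droite_py deplacer_droite_py_alt
  apply List.foldl_ext
  intro acc ligne _
  have h1 := congrArg Prod.fst (row_eq ligne)
  have h2 := congrArg Prod.snd (row_eq ligne)
  simp only at h1 h2
  show (acc.1 ++ [(PySem.List.slice? (completerZeros (fusionner (supprimerZeros ((PySem.List.slice? ligne none none (-1)).getD []))).1) none none (-1)).getD []],
        acc.2 + (fusionner (supprimerZeros ((PySem.List.slice? ligne none none (-1)).getD []))).2)
      = (acc.1 ++ [List.replicate (4 - (ligne.reverse.foldl altStep ([], false, 0)).1.length) 0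
            ++ (ligne.reverse.foldl altStep ([], false, 0)).1],
         acc.2 + (ligne.reverse.foldl altStep ([], false, 0)).2.2)
  rw [h1, h2]
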